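-- pv_equiv track=rewrite | github.com/GEM-benchmark/NL-Augmenter | nlaugmenter/transformations/syntactically_diverse_paraphrase/sowreap/parse_utils.py | get_subtrees
-- ===== SOURCE A (Python) =====
-- def get_subtrees(parse_txt_partial):
--     parse_txt_partial = parse_txt_partial[1:-1]
--     if "(" in parse_txt_partial:
--         idx_first_lb = parse_txt_partial.index("(")
--         name_const = parse_txt_partial[:idx_first_lb].strip()
--         parse_txt_partial = parse_txt_partial[idx_first_lb:]
--         count = 0
--         partition_indices = []
--         for idx in range(len(parse_txt_partial)):
--             if parse_txt_partial[idx] == "(":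
--                 count += 1
--             elif parse_txt_partial[idx] == ")":
--                 count -= 1
--             if count == 0:
--                 partition_indices.append(idx + 1)
--
--         partitions = []
--         part_idx_prev = 0
--         for i, part_idx in enumerate(partition_indices):
--             partitions.append(parse_txt_partial[part_idx_prev:part_idx])
--             part_idx_prev = part_idx
--     else:
--         temp = parse_txt_partial.split(" ")
--         name_const = temp[0]
--         partitions = [temp[1]]
--
--     return name_const, partitions
-- ===== SOURCE B (Python) =====
-- def _balance_point(s):
--     """Length of the shortest nonempty prefix of s with equally many '(' and ')'."""
--     depth = 0
--     for i, ch in enumerate(s):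
--         if ch == "(":
--             depth += 1
--         elif ch == ")":
--             depth -= 1
--         if depth == 0:
--             return i + 1
--     return None
--
--
-- def get_subtrees(parse_txt_partial):
--     parse_txt_partial = parse_txt_partial[1:-1]
--     if "(" in parse_txt_partial:
--         idx_first_lb = parse_txt_partial.index("(")
--         name_const = parse_txt_partial[:idx_first_lb].strip()
--         rest = parse_txt_partial[idx_first_lb:]
--         # repeatedly chop off the shortest balanced prefix; an unbalanced tail is dropped
--         partitions = []
--         while rest:
--             cut = _balance_point(rest)
--             if cut is None:
--                 break
--             partitions.append(rest[:cut])
--             rest = rest[cut:]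
--     else:
--         temp = parse_txt_partial.split(" ")
--         name_const = temp[0]
--         partitions = [temp[1]]
--     return name_const, partitions
-- ===== Notes on version B (the rewrite author's own statement) =====
-- stated objective: alternative
-- what changed: Replaces A's two staged loops (a global indexed scan collecting all depth-zero cut indices, then a second loop slicing between consecutive indices) with a chop-and-restart decomposition: a helper finds the shortest balanced prefix of the remaining text and a while loop repeatedly chops that prefix off, restarting the depth count at zero each time and dropping an unbalanced tail.
import Mathlib
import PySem

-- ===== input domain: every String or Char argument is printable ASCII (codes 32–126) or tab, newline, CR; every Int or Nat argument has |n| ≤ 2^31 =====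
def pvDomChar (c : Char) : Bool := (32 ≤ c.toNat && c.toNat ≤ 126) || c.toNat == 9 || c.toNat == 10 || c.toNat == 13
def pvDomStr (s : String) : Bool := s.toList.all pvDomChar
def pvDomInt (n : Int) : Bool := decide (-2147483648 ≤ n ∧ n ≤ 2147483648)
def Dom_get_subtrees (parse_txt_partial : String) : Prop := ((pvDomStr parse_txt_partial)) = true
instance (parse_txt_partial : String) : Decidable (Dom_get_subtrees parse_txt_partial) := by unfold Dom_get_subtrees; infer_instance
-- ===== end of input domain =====

-- B restructures the partition construction: instead of A's global index scan collecting
-- cut indices and a second slicing loop, B repeatedly chops off the shortest balanced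
-- prefix of the remaining text (objective: alternative decomposition, same cost).

-- ===== PORT A =====
-- first loop of A: collect idx+1 whenever the running paren depth is 0 after reading char idx
def pvA_indices : List Char → Int → Int → List Int
  | [], _, _ => []
  | c :: cs, idx, count =>
    let count' := if c = '(' then count + 1 else if c = ')' then count - 1 else count
    if count' = 0 then (idx + 1) :: pvA_indices cs (idx + 1) count'
    else pvA_indices cs (idx + 1) count'

-- second loop of A: slice the text between consecutive recorded indices
def pvA_parts (t : List Char) : List Int → Int → List String
  | [], _ => []
  | p :: ps, prev =>
    String.ofList (PySem.List.slice t (some prev) (some p)) :: pvA_parts t ps p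

def get_subtrees (parse_txt_partial : String) : String × List String :=
  let t := PySem.List.slice parse_txt_partial.toList (some 1) (some (-1))
  if PySem.Chars.isIn ['('] t then
    -- str.index of the open parenthesis: first occurrence (Chars.find, nonnegative in this branch)
    let i : Int := PySem.Chars.find t ['(']
    let name_const := String.ofList (PySem.Chars.strip (PySem.List.slice t none (some i)))
    let t2 := PySem.List.slice t (some i) none
    (name_const, pvA_parts t2 (pvA_indices t2 0 0) 0)
  else
    let temp := (PySem.Chars.split? t [' ']).getD []   -- sep nonempty, split? is some
    let name_const := String.ofList (PySem.List.pyGetD temp 0 [])  -- temp nonempty: temp[0] safe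
    -- indexing the second split field raises IndexError when t has no space; Pre_ excludes that
    (name_const, [String.ofList (PySem.List.pyGetD temp 1 [])])

-- ===== PORT B =====
-- B's helper _balance_point: length of the shortest nonempty prefix with paren-depth 0 (none if absent)
def pvB_cut : List Char → Int → Option Nat
  | [], _ => none
  | c :: cs, depth =>
    let d := if c = '(' then depth + 1 else if c = ')' then depth - 1 else depth
    if d = 0 then some 1 else (pvB_cut cs d).map (· + 1)

-- facts the while-loop's termination needs: a found cut is ≥ 1 and the scanned text is nonempty
theorem pvB_cut_pos : ∀ (cs : List Char) (d : Int) (k : Nat),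
    pvB_cut cs d = some k → 1 ≤ k ∧ 1 ≤ cs.length := by
  intro cs
  induction cs with
  | nil => intro d k h; simp [pvB_cut] at h
  | cons c cs ih =>
    intro d k h
    simp only [pvB_cut] at h
    by_cases hd : (if c = '(' then d + 1 else if c = ')' then d - 1 else d) = 0
    · rw [if_pos hd] at h; cases h; simp
    · rw [if_neg hd] at h
      rcases hk : pvB_cut cs (if c = '(' then d + 1 else if c = ')' then d - 1 else d) with _ | m <;>
        rw [hk] at h <;> simp at h
      simp [← h]

-- B's while loop: chop the shortest balanced prefix off, repeat; drop an unbalanced tail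
def pvB_split (rest : List Char) : List String :=
  match h : pvB_cut rest 0 with
  | none => []
  | some k => String.ofList (rest.take k) :: pvB_split (rest.drop k)
termination_by rest.length
decreasing_by
  have := pvB_cut_pos rest 0 k h
  simp only [List.length_drop]
  omega

def get_subtrees_alt (parse_txt_partial : String) : String × List String :=
  let t := PySem.List.slice parse_txt_partial.toList (some 1) (some (-1))
  if PySem.Chars.isIn ['('] t then
    let i : Int := PySem.Chars.find t ['(']
    let name_const := String.ofList (PySem.Chars.strip (PySem.List.slice t none (some i)))
    let rest := PySem.List.slice t (some i) none
    (name_const, pvB_split rest)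
  else
    let temp := (PySem.Chars.split? t [' ']).getD []
    let name_const := String.ofList (PySem.List.pyGetD temp 0 [])
    (name_const, [String.ofList (PySem.List.pyGetD temp 1 [])])

-- ===== PRECONDITION & SPEC =====
-- Pre_ excludes exactly the inputs where A raises IndexError: after dropping the outer
-- characters the text contains no open parenthesis and no space, so the second split field
-- that A indexes does not exist (B raises identically there).
def Pre_get_subtrees (parse_txt_partial : String) : Prop :=
  '(' ∈ (parse_txt_partial.toList.drop 1).dropLast ∨
  ' ' ∈ (parse_txt_partial.toList.drop 1).dropLast
instance (parse_txt_partial : String) : Decidable (Pre_get_subtrees parse_txt_partial) := by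
  unfold Pre_get_subtrees; infer_instance

def pvWitness_get_subtrees : String := "(NP (DT the) (NN dog))"

def Spec_get_subtrees (parse_txt_partial : String) (out : String × List String) : Prop := out = get_subtrees_alt parse_txt_partial
instance (parse_txt_partial : String) (out : String × List String) : Decidable (Spec_get_subtrees parse_txt_partial out) := by unfold Spec_get_subtrees; infer_instance

-- ===== CLAIM (what is proved, stated in full; the proofs are below) =====
def Claim_equal_get_subtrees : Prop := ∀ (parse_txt_partial : String), Dom_get_subtrees parse_txt_partial → Pre_get_subtrees parse_txt_partial → Spec_get_subtrees parse_txt_partial (get_subtrees parse_txt_partial)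

-- ===== LEMMAS AND PROOFS =====

-- proof-only intermediate: a fused single pass (slice out a partition at each depth-0 point)
def pvB_loop (t : List Char) : List Char → Int → Int → Int → List String
  | [], _, _, _ => []
  | c :: cs, idx, count, start =>
    let count' := if c = '(' then count + 1 else if c = ')' then count - 1 else count
    if count' = 0 then
      String.ofList (PySem.List.slice t (some start) (some (idx + 1))) ::
        pvB_loop t cs (idx + 1) count' (idx + 1)
    else pvB_loop t cs (idx + 1) count' start

-- A's two loops compose to the fused pass
theorem pvA_parts_indices_eq (t : List Char) (cs : List Char) :
    ∀ (idx count prev : Int),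
      pvA_parts t (pvA_indices cs idx count) prev = pvB_loop t cs idx count prev := by
  induction cs with
  | nil => intro idx count prev; simp [pvA_indices, pvA_parts, pvB_loop]
  | cons c cs ih =>
    intro idx count prev
    simp only [pvA_indices, pvB_loop]
    by_cases h : (if c = '(' then count + 1 else if c = ')' then count - 1 else count) = 0
    · simp only [h, if_pos, pvA_parts, ih]
    · simp only [h, if_false, ih]

-- the fused pass, expressed as one chop (pvB_cut) followed by a restart at the cut point
theorem pvB_loop_cut (t : List Char) : ∀ (cs : List Char) (idx count start : Int),
    pvB_loop t cs idx count start =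
      match pvB_cut cs count with
      | none => []
      | some k => String.ofList (PySem.List.slice t (some start) (some (idx + (k : Int)))) ::
          pvB_loop t (cs.drop k) (idx + (k : Int)) 0 (idx + (k : Int)) := by
  intro cs
  induction cs with
  | nil => intro idx count start; simp [pvB_loop, pvB_cut]
  | cons c cs ih =>
    intro idx count start
    simp only [pvB_loop, pvB_cut]
    by_cases h : (if c = '(' then count + 1 else if c = ')' then count - 1 else count) = 0
    · simp [h]
    · rw [if_neg h, if_neg h,
        ih (idx + 1) (if c = '(' then count + 1 else if c = ')' then count - 1 else count) start]
      cases hk : pvB_cut cs (if c = '(' then count + 1 else if c = ')' then count - 1 else count) with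
      | none => simp
      | some k =>
        have e2 : idx + ((k : Int) + 1) = idx + 1 + (k : Int) := by ring
        simp only [Option.map_some, List.drop_succ_cons]
        simp [e2]

-- the fused pass from a synchronized state (start = idx, count = 0, cs the idx-suffix of t)
-- equals B's chop-and-restart loop
theorem pvB_loop_eq_split (t : List Char) : ∀ (n : Nat) (cs : List Char) (idx : Nat),
    cs.length ≤ n → cs = t.drop idx →
    pvB_loop t cs (idx : Int) 0 (idx : Int) = pvB_split cs := by
  intro n
  induction n with
  | zero =>
    intro cs idx hn hcs
    have : cs = [] := List.eq_nil_of_length_eq_zero (Nat.le_zero.mp hn)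
    subst this
    rw [pvB_split]
    simp [pvB_loop, pvB_cut]
  | succ n ih =>
    intro cs idx hn hcs
    subst hcs
    rw [pvB_loop_cut, pvB_split]
    cases hk : pvB_cut (t.drop idx) 0 with
    | none => simp
    | some k =>
      have hpos := pvB_cut_pos _ 0 k hk
      -- emitted slice = take k of the suffix; recursive call resynchronizes at idx + k
      have h1 : PySem.List.slice t (some (idx : Int)) (some ((idx : Int) + (k : Int))) =
          (t.drop idx).take k := PySem.List.slice_natCast_add t idx k
      have hdrop : (t.drop idx).drop k = t.drop (idx + k) := by
        rw [List.drop_drop]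
      have hlen : (t.drop (idx + k)).length ≤ n := by
        have h2 : (t.drop idx).length ≤ n + 1 := hn
        rw [List.length_drop] at h2 ⊢
        omega
      have ihk := ih (t.drop (idx + k)) (idx + k) hlen rfl
      have ihk' : pvB_loop t (t.drop (idx + k)) ((idx : Int) + (k : Int)) 0
          ((idx : Int) + (k : Int)) = pvB_split (t.drop (idx + k)) := by
        push_cast at ihk; exact ihk
      simp [h1, hdrop, ihk']

-- A's whole partition construction equals B's
theorem pvAB (t2 : List Char) :
    pvA_parts t2 (pvA_indices t2 0 0) 0 = pvB_split t2 := by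
  rw [pvA_parts_indices_eq]
  have := pvB_loop_eq_split t2 t2.length t2 0 le_rfl (by simp)
  simpa using this

-- ===== VERDICT (by name: the statement is the Claim_ definition above) =====
theorem get_subtrees_spec : Claim_equal_get_subtrees := by
  intro s _ _
  show get_subtrees s = get_subtrees_alt s
  unfold get_subtrees get_subtrees_alt
  simp only [pvAB]
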